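-- pv_equiv track=rewrite | github.com/abe-winter/pg13-py | pg13/diff.py | seqingroups
-- ===== SOURCE A (Python) =====
-- def seqingroups(groups,seq):
--   'helper for contigsub. takes the list of lists returned by groupelts and an array to check.\
--   returns (groupindex,indexingroup,matchlen) of longest match or None if no match'
--   if not (groups and seq): return None
--   bestmatch=None,None,0
--   if any(len(g)<2 for g in groups): raise ValueError('some subgroups have length < 2')
--   for i,g in filter(lambda x:x[1][0],enumerate(groups)): # i.e. we're only interested in groups with common elements
--     # begin starts at 0 so begin+1 starts at 1. (first elt of each group is the bool indicator)
--     begin=0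
--     while 1:
--       try: begin=g.index(seq[0],begin+1)
--       except ValueError: break
--       jmax=min(len(g)-begin,len(seq))
--       for j in range(jmax):
--         if g[begin+j]!=seq[j]: break
--       else: j+=1 # so matchlen works below
--       matchlen=min(j,jmax)
--       if matchlen<bestmatch[2]: continue
--       bestmatch=[i,begin,matchlen] # note: begin is an offset including the initial bool
--   return bestmatch if bestmatch[2] else None
-- ===== SOURCE B (Python) =====
-- def _zself(s):
--     'Z-array of s with the convention z[0] = len(s): z[j] = length of the longest common prefix of s and s[j:]'
--     n = len(s)
--     z = [0] * n
--     if n: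
--         z[0] = n
--     l = r = 0
--     for i in range(1, n):
--         k = min(r - i, z[i - l]) if i < r else 0
--         while i + k < n and s[k] == s[i + k]:
--             k += 1
--         z[i] = k
--         if i + k > r:
--             l, r = i, i + k
--     return z
--
-- def _prefmatch(seq, zseq, g):
--     'm[p] = length of the longest common prefix of g[p:] and seq, via the Z window over g with zseq lookups'
--     n = len(g)
--     ls = len(seq)
--     m = [0] * n
--     l = r = 0
--     for i in range(n):
--         k = min(r - i, zseq[i - l]) if i < r else 0
--         while i + k < n and k < ls and g[i + k] == seq[k]:
--             k += 1
--         m[i] = k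
--         if i + k > r:
--             l, r = i, i + k
--     return m
--
-- def seqingroups(groups, seq):
--     'helper for contigsub. takes the list of lists returned by groupelts and an array to check.\
--     returns (groupindex,indexingroup,matchlen) of longest match or None if no match'
--     if not (groups and seq):
--         return None
--     if any(len(g) < 2 for g in groups):
--         raise ValueError('some subgroups have length < 2')
--     zseq = _zself(list(seq))
--     best = None
--     for i, g in enumerate(groups):
--         if not g[0]:
--             continue
--         m = _prefmatch(seq, zseq, g)
--         for p in range(1, len(g)):
--             if m[p] and (best is None or m[p] >= best[2]):
--                 best = [i, p, m[p]]
--     return best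
-- ===== Notes on version B (the rewrite author's own statement) =====
-- stated objective: alternative
-- what changed: A re-finds each occurrence of seq[0] with list.index and re-extends the match naively at every occurrence; B computes the Z-array of seq once, then scans each group with the two-string Z-algorithm window to obtain every match length, and reduces the candidates with A's last-max (>=) rule.
import Mathlib
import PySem

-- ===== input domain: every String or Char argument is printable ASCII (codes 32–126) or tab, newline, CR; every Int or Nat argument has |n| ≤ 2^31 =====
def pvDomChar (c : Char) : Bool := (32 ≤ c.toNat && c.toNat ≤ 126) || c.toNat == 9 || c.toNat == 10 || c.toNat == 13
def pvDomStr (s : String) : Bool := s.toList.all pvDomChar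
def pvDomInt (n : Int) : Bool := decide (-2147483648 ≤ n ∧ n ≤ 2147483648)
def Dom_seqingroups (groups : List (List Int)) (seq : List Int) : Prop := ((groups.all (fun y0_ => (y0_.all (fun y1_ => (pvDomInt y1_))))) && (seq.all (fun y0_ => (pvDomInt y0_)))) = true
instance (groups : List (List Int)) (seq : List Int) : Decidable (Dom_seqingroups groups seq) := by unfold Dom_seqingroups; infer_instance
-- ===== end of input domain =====

-- B replaces A's per-occurrence rescanning (list.index to find each position matching seq[0],
-- then extending the match naively there) by the Z-algorithm: the Z-array of seq is computed
-- once, each group is scanned with the two-string Z window, and the candidate match lengths are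
-- reduced with A's last-max (>=) rule. Objective: alternative (a different algorithm).

-- ===== PORT A =====
-- g.index(x, s): first position p >= s with g[p] = x (ValueError → none); scans the suffix g[s:]
def pvIndexAux (x : Int) : List Int → Nat → Option Nat
  | [], _ => none
  | a :: l, p => if a = x then some p else pvIndexAux x l (p + 1)

def pvIndexFrom (g : List Int) (x : Int) (s : Nat) : Option Nat :=
  pvIndexAux x (g.drop s) s

-- the inner 'for j in range(jmax): if g[begin+j]!=seq[j]: break / else: j+=1' loop of A
-- (fuel = jmax - j counts the remaining iterations; indices in range when called, so getD is exact)
def pvInnerA (g seq : List Int) (b : Nat) : Nat → Nat → Nat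
  | j, 0 => j
  | j, fuel + 1 => if g.getD (b + j) 0 ≠ seq.getD j 0 then j else pvInnerA g seq b (j + 1) fuel

def pvInnerJ (g seq : List Int) (b jmax j : Nat) : Nat :=
  pvInnerA g seq b j (jmax - j)

-- A's 'while 1' loop for one group g (enumerate index i); best = bestmatch, none = (None,None,0);
-- fuel = g.length - begin_ bounds the iterations left (begin strictly increases and is < len(g))
def pvALoopA (g seq : List Int) (i : Int) : Nat → Nat → Option (Int × Nat × Nat) → Option (Int × Nat × Nat)
  | 0, _, best => best
  | fuel + 1, begin_, best =>
    match pvIndexFrom g (seq.headD 0) (begin_ + 1) with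
    | none => best
    | some b =>
        let jmax := min (g.length - b) seq.length
        let j := pvInnerJ g seq b jmax 0
        let matchlen := min j jmax
        let best' := if matchlen < (match best with | none => 0 | some t => t.2.2) then best
                     else some (i, b, matchlen)
        pvALoopA g seq i fuel b best'

def pvALoop (g seq : List Int) (i : Int) (begin_ : Nat)
    (best : Option (Int × Nat × Nat)) : Option (Int × Nat × Nat) :=
  pvALoopA g seq i (g.length - begin_) begin_ best

def seqingroups (groups : List (List Int)) (seq : List Int) : Option (List Int) :=
  if groups = [] ∨ seq = [] then none
  else if groups.any (fun g => g.length < 2) then none -- Python raises ValueError here (outside Pre_)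
  else
    let best := (PySem.List.enumerate groups).foldl
      (fun best ig => if ig.2.headD 0 ≠ 0 then pvALoop ig.2 seq ig.1 0 best else best) none
    match best with
    | none => none                 -- bestmatch[2] still 0: return None
    | some t => if t.2.2 ≠ 0 then some [t.1, (t.2.1 : Int), (t.2.2 : Int)] else none

-- ===== PORT B =====
-- the 'while i+k<n and s[k]==s[i+k]: k+=1' loop of _zself
-- (fuel = n - (i+k) counts the remaining in-range steps; k < n whenever reached, so getD is exact)
def pvZExtA (s : List Int) (i : Nat) : Nat → Nat → Nat
  | k, 0 => k
  | k, fuel + 1 => if s.getD k 0 = s.getD (i + k) 0 then pvZExtA s i (k + 1) fuel else k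

def pvZExtend (s : List Int) (i k : Nat) : Nat :=
  pvZExtA s i k (s.length - (i + k))

-- one iteration of _zself's for-loop; state = (l, r, z-values for indices 0..i-1)
def pvZStep (s : List Int) (st : Nat × Nat × List Nat) (i : Nat) : Nat × Nat × List Nat :=
  let k0 := if i < st.2.1 then min (st.2.1 - i) (st.2.2.getD (i - st.1) 0) else 0
  let k := pvZExtend s i k0
  let z' := st.2.2 ++ [k]
  if st.2.1 < i + k then (i, i + k, z') else (st.1, st.2.1, z')

-- _zself(s): z[0] = len(s), indices 1..n-1 are filled in order
def pvZSelf (s : List Int) : List Nat :=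
  if s.length = 0 then []
  else ((List.range' 1 (s.length - 1)).foldl (pvZStep s) (0, 0, [s.length])).2.2

-- the 'while i+k<n and k<ls and g[i+k]==seq[k]: k+=1' loop of _prefmatch
-- (fuel = min(n-(i+k), ls-k); indices in range whenever reached, so getD is exact)
def pvMExtA (seq g : List Int) (i : Nat) : Nat → Nat → Nat
  | k, 0 => k
  | k, fuel + 1 => if g.getD (i + k) 0 = seq.getD k 0 then pvMExtA seq g i (k + 1) fuel else k

def pvMExt (seq g : List Int) (i k : Nat) : Nat :=
  pvMExtA seq g i k (min (g.length - (i + k)) (seq.length - k))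

-- one iteration of _prefmatch's for-loop; state = (l, r, m-values for indices 0..i-1)
def pvMStep (seq : List Int) (zs : List Nat) (g : List Int)
    (st : Nat × Nat × List Nat) (i : Nat) : Nat × Nat × List Nat :=
  let k0 := if i < st.2.1 then min (st.2.1 - i) (zs.getD (i - st.1) 0) else 0
  let k := pvMExt seq g i k0
  let m' := st.2.2 ++ [k]
  if st.2.1 < i + k then (i, i + k, m') else (st.1, st.2.1, m')

-- _prefmatch(seq, zseq, g): m[p] = length of the common prefix of g[p:] and seq
def pvPrefMatch (seq : List Int) (zs : List Nat) (g : List Int) : List Nat :=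
  ((List.range' 0 g.length).foldl (pvMStep seq zs g) (0, 0, [])).2.2

-- body of B's 'for p in range(1,len(g))' loop: m[p]; update best on m[p] and m[p]>=best[2]
def pvBInner (i : Int) (m : List Nat)
    (best : Option (Int × Nat × Nat)) (p : Nat) : Option (Int × Nat × Nat) :=
  let mp := m.getD p 0
  match best with
  | none => if mp ≠ 0 then some (i, p, mp) else none
  | some x => if mp ≠ 0 ∧ x.2.2 ≤ mp then some (i, p, mp) else some x

def seqingroups_alt (groups : List (List Int)) (seq : List Int) : Option (List Int) :=
  if groups = [] ∨ seq = [] then none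
  else if groups.any (fun g => g.length < 2) then none -- Python raises ValueError here (outside Pre_)
  else
    let zs := pvZSelf seq
    ((PySem.List.enumerate groups).foldl (fun best ig =>
      if ig.2.headD 0 ≠ 0 then
        (List.range' 1 (ig.2.length - 1)).foldl (pvBInner ig.1 (pvPrefMatch seq zs ig.2)) best
      else best) none).map (fun c => [c.1, (c.2.1 : Int), (c.2.2 : Int)])

-- ===== PRECONDITION & SPEC =====
-- Pre_ excludes exactly the inputs where A raises ValueError: both lists nonempty while some
-- group has fewer than 2 elements (B raises the same ValueError there).
def Pre_seqingroups (groups : List (List Int)) (seq : List Int) : Prop :=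
  groups = [] ∨ seq = [] ∨ ∀ g ∈ groups, 2 ≤ g.length
instance (groups : List (List Int)) (seq : List Int) : Decidable (Pre_seqingroups groups seq) := by
  unfold Pre_seqingroups; infer_instance

def pvWitness_seqingroups : List (List Int) × List Int := ([[1, 2, 3], [0, 2]], [2, 3])

def Spec_seqingroups (groups : List (List Int)) (seq : List Int) (out : Option (List Int)) : Prop := out = seqingroups_alt groups seq
instance (groups : List (List Int)) (seq : List Int) (out : Option (List Int)) : Decidable (Spec_seqingroups groups seq out) := by unfold Spec_seqingroups; infer_instance

-- ===== CLAIM (what is proved, stated in full; the proofs are below) =====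
def Claim_equal_seqingroups : Prop := ∀ (groups : List (List Int)) (seq : List Int), Dom_seqingroups groups seq → Pre_seqingroups groups seq → Spec_seqingroups groups seq (seqingroups groups seq)

-- ===== LEMMAS AND PROOFS =====

-- length of the common prefix of two Int lists (taken as (g-suffix, seq))
def pvMatchlenLoop : List Int → List Int → Nat
  | a :: as_, b :: bs => if a ≠ b then 0 else pvMatchlenLoop as_ bs + 1
  | _, _ => 0

-- A's update step (≥ keeps the later candidate); none stands for (None,None,0)
def pvUpdA (best : Option (Int × Nat × Nat)) (c : Int × Nat × Nat) : Option (Int × Nat × Nat) :=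
  if c.2.2 < (match best with | none => 0 | some t => t.2.2) then best else some c

-- the list of positions A's index-loop visits, from s on
def pvPos (g : List Int) (x : Int) (s : Nat) : List Nat :=
  if h : s < g.length then
    (if g[s] = x then s :: pvPos g x (s + 1) else pvPos g x (s + 1))
  else []
termination_by g.length - s

theorem pvIndexAux_bounds (x : Int) : ∀ (l : List Int) (p b : Nat),
    pvIndexAux x l p = some b → p ≤ b ∧ b < p + l.length := by
  intro l
  induction l with
  | nil => intro p b h; simp [pvIndexAux] at h
  | cons a l ih =>
      intro p b h
      rw [pvIndexAux] at h
      by_cases ha : a = x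
      · rw [if_pos ha] at h
        cases h
        simp
      · rw [if_neg ha] at h
        have := ih (p + 1) b h
        simp only [List.length_cons]
        omega

theorem pvIndexFrom_bounds (g : List Int) (x : Int) (s : Nat) (b : Nat)
    (h : pvIndexFrom g x s = some b) : s ≤ b ∧ b < g.length := by
  have h2 := pvIndexAux_bounds x (g.drop s) s b h
  simp only [List.length_drop] at h2
  rcases Nat.lt_or_ge s g.length with hs | hs
  · omega
  · rw [pvIndexFrom, List.drop_eq_nil_of_le hs] at h
    simp [pvIndexAux] at h

theorem pvIndexFrom_unfold (g : List Int) (x : Int) (s : Nat) :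
    pvIndexFrom g x s = if h : s < g.length then
        (if g[s] = x then some s else pvIndexFrom g x (s + 1))
      else none := by
  by_cases h : s < g.length
  · rw [dif_pos h, pvIndexFrom, List.drop_eq_getElem_cons h, pvIndexAux, pvIndexFrom]
  · rw [dif_neg h, pvIndexFrom, List.drop_eq_nil_of_le (by omega)]
    rfl

theorem pvIndexFrom_none (g : List Int) (x : Int) (s : Nat) (h : g.length ≤ s) :
    pvIndexFrom g x s = none := by
  rw [pvIndexFrom, List.drop_eq_nil_of_le h]
  rfl

theorem pvPos_eq_indexFrom (g : List Int) (x : Int) (s : Nat) :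
    pvPos g x s = (match pvIndexFrom g x s with
      | none => []
      | some b => b :: pvPos g x (b + 1)) := by
  fun_induction pvPos g x s with
  | case1 s h1 h2 ih => rw [pvIndexFrom_unfold, dif_pos h1, if_pos h2]
  | case2 s h1 h2 ih => rw [pvIndexFrom_unfold, dif_pos h1, if_neg h2, ih]
  | case3 s h1 => rw [pvIndexFrom_unfold, dif_neg h1]

theorem pvPos_filter (g : List Int) (x : Int) (s : Nat) :
    pvPos g x s = (List.range' s (g.length - s)).filter (fun p => g.getD p 0 = x) := by
  fun_induction pvPos g x s with
  | case1 s h1 h2 ih =>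
      have h3 : g.length - s = (g.length - (s+1)) + 1 := by omega
      rw [h3, List.range'_succ, List.filter_cons]
      simp only [List.getD_eq_getElem g 0 h1, h2, decide_true, ih]
      simp
  | case2 s h1 h2 ih =>
      have h3 : g.length - s = (g.length - (s+1)) + 1 := by omega
      rw [h3, List.range'_succ, List.filter_cons]
      simp only [List.getD_eq_getElem g 0 h1, h2, decide_false, ih]
      simp
  | case3 s h1 =>
      have h3 : g.length - s = 0 := by omega
      rw [h3]; rfl

theorem pvMatchlenLoop_le (a b : List Int) : pvMatchlenLoop a b ≤ min a.length b.length := by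
  fun_induction pvMatchlenLoop a b with
  | case1 a as_ b bs h => omega
  | case2 a as_ b bs h ih => simp only [List.length_cons]; omega
  | case3 a b h => simp

theorem pvInnerA_eq (g seq : List Int) (b : Nat) :
    ∀ (fuel j : Nat), b + (j + fuel) ≤ g.length → j + fuel ≤ seq.length →
      pvInnerA g seq b j fuel = min (j + fuel) (j + pvMatchlenLoop (g.drop (b + j)) (seq.drop j)) := by
  intro fuel
  induction fuel with
  | zero => intro j hg hs; simp [pvInnerA]
  | succ fuel ih =>
      intro j hg hs
      have hbj : b + j < g.length := by omega
      have hjs : j < seq.length := by omega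
      rw [pvInnerA, List.drop_eq_getElem_cons hbj, List.drop_eq_getElem_cons hjs, pvMatchlenLoop]
      by_cases hne : g.getD (b + j) 0 ≠ seq.getD j 0
      · rw [if_pos hne]
        rw [List.getD_eq_getElem g 0 hbj, List.getD_eq_getElem seq 0 hjs] at hne
        rw [if_pos hne]
        omega
      · rw [if_neg hne]
        rw [List.getD_eq_getElem g 0 hbj, List.getD_eq_getElem seq 0 hjs] at hne
        rw [if_neg hne]
        have := ih (j + 1) (by omega) (by omega)
        have h5 : b + (j + 1) = b + j + 1 := by omega
        rw [h5] at this
        rw [this]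
        omega

theorem pvInnerJ_eq (g seq : List Int) (b jmax : Nat)
    (hg : b + jmax ≤ g.length) (hs : jmax ≤ seq.length) :
    ∀ j, j ≤ jmax →
      pvInnerJ g seq b jmax j = min jmax (j + pvMatchlenLoop (g.drop (b + j)) (seq.drop j)) := by
  intro j hj
  have h := pvInnerA_eq g seq b (jmax - j) j (by omega) (by omega)
  have he : j + (jmax - j) = jmax := by omega
  rw [he] at h
  rw [pvInnerJ]
  exact h

theorem pvLcp_inner (g seq : List Int) (b : Nat) (hb : b < g.length) :
    min (pvInnerJ g seq b (min (g.length - b) seq.length) 0) (min (g.length - b) seq.length)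
      = pvMatchlenLoop (g.drop b) seq := by
  have h := pvInnerJ_eq g seq b (min (g.length - b) seq.length) (by omega) (by omega) 0 (by omega)
  simp only [Nat.zero_add, Nat.add_zero, List.drop_zero] at h
  rw [h]
  have h2 := pvMatchlenLoop_le (g.drop b) seq
  simp only [List.length_drop] at h2
  omega

theorem pvALoopA_eq (g seq : List Int) (i : Int) :
    ∀ (fuel begin_ : Nat) (best : Option (Int × Nat × Nat)), g.length - begin_ ≤ fuel →
      pvALoopA g seq i fuel begin_ best =
        ((pvPos g (seq.headD 0) (begin_ + 1)).map
          (fun p => (i, p, pvMatchlenLoop (g.drop p) seq))).foldl pvUpdA best := by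
  intro fuel
  induction fuel with
  | zero =>
      intro begin_ best h
      rw [pvPos_eq_indexFrom, pvIndexFrom_none g _ (begin_ + 1) (by omega)]
      rfl
  | succ fuel ih =>
      intro begin_ best h
      rw [pvPos_eq_indexFrom]
      cases hidx : pvIndexFrom g (seq.headD 0) (begin_ + 1) with
      | none => simp only [pvALoopA, hidx]; rfl
      | some b =>
          have hb := pvIndexFrom_bounds g (seq.headD 0) (begin_ + 1) b hidx
          simp only [pvALoopA, hidx, List.map_cons, List.foldl_cons]
          rw [ih b _ (by omega)]
          congr 1
          simp only [pvUpdA, pvLcp_inner g seq b hb.2]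

theorem pvALoop_eq_foldl (g seq : List Int) (i : Int) (begin_ : Nat)
    (best : Option (Int × Nat × Nat)) :
    pvALoop g seq i begin_ best =
      ((pvPos g (seq.headD 0) (begin_ + 1)).map
        (fun p => (i, p, pvMatchlenLoop (g.drop p) seq))).foldl pvUpdA best := by
  rw [pvALoop, pvALoopA_eq g seq i _ _ best (by omega)]

-- ---- match-length lemmas ----

theorem pvGetD_drop {a : Type} (s : List a) (d : a) (i j : Nat) :
    (s.drop i).getD j d = s.getD (i + j) d := by
  simp [List.getD_eq_getElem?_getD, List.getElem?_drop]

theorem le_mlen_iff (a : List Int) :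
    ∀ (b : List Int) (k : Nat),
      k ≤ pvMatchlenLoop a b ↔ k ≤ a.length ∧ k ≤ b.length ∧ ∀ j < k, a.getD j 0 = b.getD j 0 := by
  induction a with
  | nil =>
      intro b k
      constructor
      · intro h
        have : k = 0 := by simpa [pvMatchlenLoop] using h
        subst this; simp
      · intro h; simp at h; omega
  | cons x as_ ih =>
      intro b k
      cases b with
      | nil =>
          constructor
          · intro h
            have : k = 0 := by
              cases k with
              | zero => rfl
              | succ k' => simp [pvMatchlenLoop] at h
            subst this; simp
          · intro h
            have : k = 0 := by have := h.2.1; simpa using this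
            subst this; simp
      | cons y bs =>
          cases k with
          | zero => simp
          | succ k' =>
              by_cases hxy : x = y
              · subst hxy
                have hrw : pvMatchlenLoop (x :: as_) (x :: bs) = pvMatchlenLoop as_ bs + 1 := by
                  simp [pvMatchlenLoop]
                rw [hrw, Nat.add_le_add_iff_right, ih bs k']
                constructor
                · rintro ⟨h1, h2, h3⟩
                  refine ⟨by simpa using Nat.succ_le_succ h1, by simpa using Nat.succ_le_succ h2, ?_⟩
                  intro j hj
                  cases j with
                  | zero => simp
                  | succ j' => simpa using h3 j' (by omega)
                · rintro ⟨h1, h2, h3⟩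
                  refine ⟨by simpa using h1, by simpa using h2, ?_⟩
                  intro j hj
                  have := h3 (j + 1) (by omega)
                  simpa using this
              · have hrw : pvMatchlenLoop (x :: as_) (y :: bs) = 0 := by
                  simp [pvMatchlenLoop, hxy]
                rw [hrw]
                constructor
                · intro h; omega
                · rintro ⟨h1, h2, h3⟩
                  exact absurd (by simpa using h3 0 (by omega)) hxy

theorem mlen_getD_eq {a b : List Int} {j : Nat} (h : j < pvMatchlenLoop a b) :
    a.getD j 0 = b.getD j 0 :=
  ((le_mlen_iff a b (pvMatchlenLoop a b)).1 le_rfl).2.2 j h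

-- ---- correctness of the self Z-array ----

theorem pvZExtA_eq (s : List Int) (i : Nat) (hi : 1 ≤ i) :
    ∀ (fuel k : Nat), fuel = s.length - (i + k) → k ≤ pvMatchlenLoop s (s.drop i) →
      pvZExtA s i k fuel = pvMatchlenLoop s (s.drop i) := by
  intro fuel
  induction fuel with
  | zero =>
      intro k hf hk
      have h2 := pvMatchlenLoop_le s (s.drop i)
      simp only [List.length_drop] at h2
      have hke : k = pvMatchlenLoop s (s.drop i) := by omega
      rw [pvZExtA, hke]
  | succ fuel ih =>
      intro k hf hk
      have hkn : i + k < s.length := by omega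
      rw [pvZExtA]
      by_cases heq : s.getD k 0 = s.getD (i + k) 0
      · rw [if_pos heq]
        apply ih (k + 1) (by omega)
        rw [le_mlen_iff]
        refine ⟨by omega, by simp only [List.length_drop]; omega, ?_⟩
        intro j hj
        rcases Nat.lt_or_ge j k with hjk | hjk
        · exact ((le_mlen_iff s (s.drop i) k).1 hk).2.2 j hjk
        · have hje : j = k := by omega
          subst hje
          rw [pvGetD_drop]
          exact heq
      · rw [if_neg heq]
        have hle : pvMatchlenLoop s (s.drop i) ≤ k := by
          by_contra hlt
          push_neg at hlt
          have := mlen_getD_eq hlt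
          rw [pvGetD_drop] at this
          exact heq this
        omega

theorem pvZExtend_eq (s : List Int) (i : Nat) (hi : 1 ≤ i) :
    ∀ k, k ≤ pvMatchlenLoop s (s.drop i) → pvZExtend s i k = pvMatchlenLoop s (s.drop i) :=
  fun k hk => pvZExtA_eq s i hi _ k rfl hk

-- invariant of _zself's loop before processing index i
def pvZInv (s : List Int) (i : Nat) (st : Nat × Nat × List Nat) : Prop :=
  st.2.2.length = i ∧
  st.2.2.getD 0 0 = s.length ∧
  (∀ j, 1 ≤ j → j < i → st.2.2.getD j 0 = pvMatchlenLoop s (s.drop j)) ∧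
  st.1 < i ∧ st.2.1 ≤ s.length ∧ (i < st.2.1 → 1 ≤ st.1) ∧
  st.2.1 - st.1 ≤ pvMatchlenLoop s (s.drop st.1)

theorem pvZInv_step (s : List Int) (i : Nat) (st : Nat × Nat × List Nat)
    (hi : 1 ≤ i) (hin : i < s.length) (h : pvZInv s i st) :
    pvZInv s (i + 1) (pvZStep s st i) := by
  obtain ⟨hlen, hz0, hz, hl, hr, hlr, hlcp⟩ := h
  have hk0 : (if i < st.2.1 then min (st.2.1 - i) (st.2.2.getD (i - st.1) 0) else 0)
      ≤ pvMatchlenLoop s (s.drop i) := by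
    by_cases hir : i < st.2.1
    · rw [if_pos hir]
      have hl1 : 1 ≤ st.1 := hlr hir
      have hzl : st.2.2.getD (i - st.1) 0 = pvMatchlenLoop s (s.drop (i - st.1)) :=
        hz (i - st.1) (by omega) (by omega)
      rw [le_mlen_iff]
      refine ⟨by omega, by simp only [List.length_drop]; omega, ?_⟩
      intro j hj
      have hj1 : j < pvMatchlenLoop s (s.drop (i - st.1)) := by omega
      have h1 : s.getD j 0 = s.getD (i - st.1 + j) 0 := by
        have := mlen_getD_eq hj1
        rwa [pvGetD_drop] at this
      have hj2 : i - st.1 + j < pvMatchlenLoop s (s.drop st.1) := by omega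
      have h2 : s.getD (i - st.1 + j) 0 = s.getD (i + j) 0 := by
        have := mlen_getD_eq hj2
        rw [pvGetD_drop] at this
        have he : st.1 + (i - st.1 + j) = i + j := by omega
        rwa [he] at this
      rw [pvGetD_drop]
      exact h1.trans h2
    · rw [if_neg hir]; omega
  have hkeq : pvZExtend s i (if i < st.2.1 then min (st.2.1 - i) (st.2.2.getD (i - st.1) 0) else 0)
      = pvMatchlenLoop s (s.drop i) := pvZExtend_eq s i hi _ hk0
  have hklen : pvMatchlenLoop s (s.drop i) ≤ s.length - i := by
    have := pvMatchlenLoop_le s (s.drop i)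
    simp only [List.length_drop] at this
    omega
  have hz0' : (st.2.2 ++ [pvMatchlenLoop s (s.drop i)]).getD 0 0 = s.length := by
    rw [List.getD_append _ _ _ _ (by omega)]
    exact hz0
  have hz' : ∀ j, 1 ≤ j → j < i + 1 →
      (st.2.2 ++ [pvMatchlenLoop s (s.drop i)]).getD j 0 = pvMatchlenLoop s (s.drop j) := by
    intro j hj1 hj2
    rcases Nat.lt_or_ge j i with hji | hji
    · rw [List.getD_append _ _ _ _ (by omega)]
      exact hz j hj1 hji
    · have hje : j = i := by omega
      subst hje
      rw [List.getD_eq_getElem?_getD, List.getElem?_append_right (by omega), hlen]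
      simp
  have hstep : pvZStep s st i =
      if st.2.1 < i + pvMatchlenLoop s (s.drop i) then
        (i, i + pvMatchlenLoop s (s.drop i), st.2.2 ++ [pvMatchlenLoop s (s.drop i)])
      else (st.1, st.2.1, st.2.2 ++ [pvMatchlenLoop s (s.drop i)]) := by
    simp only [pvZStep]
    rw [hkeq]
  rw [hstep]
  by_cases hup : st.2.1 < i + pvMatchlenLoop s (s.drop i)
  · rw [if_pos hup]
    unfold pvZInv
    refine ⟨by simp [hlen], hz0', hz', ?_, ?_, fun _ => hi, ?_⟩
    · show i < i + 1
      omega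
    · show i + pvMatchlenLoop s (s.drop i) ≤ s.length
      omega
    · show i + pvMatchlenLoop s (s.drop i) - i ≤ pvMatchlenLoop s (s.drop i)
      omega
  · rw [if_neg hup]
    unfold pvZInv
    refine ⟨by simp [hlen], hz0', hz', ?_, hr, ?_, hlcp⟩
    · show st.1 < i + 1
      omega
    · intro h
      exact hlr (Nat.lt_of_succ_lt (show i + 1 < st.2.1 from h))

theorem pvZ_fold_inv (s : List Int) :
    ∀ m, 1 + m ≤ s.length →
      pvZInv s (1 + m) ((List.range' 1 m).foldl (pvZStep s) (0, 0, [s.length])) := by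
  intro m
  induction m with
  | zero =>
      intro _
      simp only [List.range'_zero, List.foldl_nil]
      exact ⟨rfl, by simp, fun j h1 h2 => absurd h2 (by omega), show (0 : Nat) < 1 by omega,
        Nat.zero_le _, fun h => absurd (show (1 : Nat) < 0 from h) (by omega), Nat.zero_le _⟩
  | succ m ih =>
      intro hm
      rw [List.range'_concat, List.foldl_append, List.foldl_cons, List.foldl_nil,
        Nat.one_mul]
      have h := pvZInv_step s (1 + m) _ (by omega) (by omega) (ih (by omega))
      have he : 1 + m + 1 = 1 + (m + 1) := by omega
      rwa [he] at h

theorem pvZSelf_inv (s : List Int) (hs : s.length ≠ 0) :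
    pvZInv s s.length ((List.range' 1 (s.length - 1)).foldl (pvZStep s) (0, 0, [s.length])) := by
  have h := pvZ_fold_inv s (s.length - 1) (by omega)
  rwa [show 1 + (s.length - 1) = s.length by omega] at h

theorem pvZSelf_getD0 (s : List Int) (hs : s.length ≠ 0) :
    (pvZSelf s).getD 0 0 = s.length := by
  rw [pvZSelf, if_neg hs]
  exact (pvZSelf_inv s hs).2.1

theorem pvZSelf_getD (s : List Int) (i : Nat) (h1 : 1 ≤ i) (h2 : i < s.length) :
    (pvZSelf s).getD i 0 = pvMatchlenLoop s (s.drop i) := by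
  rw [pvZSelf, if_neg (by omega)]
  exact (pvZSelf_inv s (by omega)).2.2.1 i h1 h2

-- ---- correctness of the per-group match-length array ----

theorem pvMExtA_eq (seq g : List Int) (i : Nat) :
    ∀ (fuel k : Nat), fuel = min (g.length - (i + k)) (seq.length - k) →
      k ≤ pvMatchlenLoop (g.drop i) seq →
      pvMExtA seq g i k fuel = pvMatchlenLoop (g.drop i) seq := by
  intro fuel
  induction fuel with
  | zero =>
      intro k hf hk
      have h2 := pvMatchlenLoop_le (g.drop i) seq
      simp only [List.length_drop] at h2
      have hke : k = pvMatchlenLoop (g.drop i) seq := by omega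
      rw [pvMExtA, hke]
  | succ fuel ih =>
      intro k hf hk
      have hkg : i + k < g.length := by omega
      have hks : k < seq.length := by omega
      rw [pvMExtA]
      by_cases heq : g.getD (i + k) 0 = seq.getD k 0
      · rw [if_pos heq]
        apply ih (k + 1) (by omega)
        rw [le_mlen_iff]
        refine ⟨by simp only [List.length_drop]; omega, by omega, ?_⟩
        intro j hj
        rcases Nat.lt_or_ge j k with hjk | hjk
        · exact ((le_mlen_iff (g.drop i) seq k).1 hk).2.2 j hjk
        · have hje : j = k := by omega
          subst hje
          rw [pvGetD_drop]
          exact heq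
      · rw [if_neg heq]
        have hle : pvMatchlenLoop (g.drop i) seq ≤ k := by
          by_contra hlt
          push_neg at hlt
          have := mlen_getD_eq hlt
          rw [pvGetD_drop] at this
          exact heq this
        omega

theorem pvMExt_eq (seq g : List Int) (i k : Nat) (hk : k ≤ pvMatchlenLoop (g.drop i) seq) :
    pvMExt seq g i k = pvMatchlenLoop (g.drop i) seq :=
  pvMExtA_eq seq g i _ k rfl hk

-- invariant of _prefmatch's loop before processing index i
def pvMInv (seq g : List Int) (i : Nat) (st : Nat × Nat × List Nat) : Prop :=
  st.2.2.length = i ∧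
  (∀ j, j < i → st.2.2.getD j 0 = pvMatchlenLoop (g.drop j) seq) ∧
  st.1 ≤ i ∧ st.2.1 ≤ g.length ∧
  st.2.1 - st.1 ≤ pvMatchlenLoop (g.drop st.1) seq

theorem pvMInv_step (seq g : List Int) (zs : List Nat)
    (hzs0 : zs.getD 0 0 = seq.length)
    (hzsj : ∀ j, 1 ≤ j → j < seq.length → zs.getD j 0 = pvMatchlenLoop seq (seq.drop j))
    (i : Nat) (st : Nat × Nat × List Nat) (hin : i < g.length)
    (h : pvMInv seq g i st) : pvMInv seq g (i + 1) (pvMStep seq zs g st i) := by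
  obtain ⟨hlen, hm, hl, hr, hw⟩ := h
  have hwls := pvMatchlenLoop_le (g.drop st.1) seq
  simp only [List.length_drop] at hwls
  have hk0 : (if i < st.2.1 then min (st.2.1 - i) (zs.getD (i - st.1) 0) else 0)
      ≤ pvMatchlenLoop (g.drop i) seq := by
    by_cases hir : i < st.2.1
    · rw [if_pos hir]
      by_cases hil : i - st.1 = 0
      · have hie : st.1 = i := by omega
        rw [hil, hzs0]
        rw [le_mlen_iff]
        refine ⟨by simp only [List.length_drop]; omega, by omega, ?_⟩
        intro j hj
        rw [pvGetD_drop]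
        have hj2 : j < pvMatchlenLoop (g.drop st.1) seq := by omega
        have h2 := mlen_getD_eq hj2
        rw [pvGetD_drop] at h2
        rw [hie] at h2
        exact h2
      · have hils : i - st.1 < seq.length := by omega
        have hzv := hzsj (i - st.1) (by omega) hils
        rw [hzv]
        have hzls := pvMatchlenLoop_le seq (seq.drop (i - st.1))
        rw [le_mlen_iff]
        refine ⟨by simp only [List.length_drop]; omega, by omega, ?_⟩
        intro j hj
        have hj1 : j < pvMatchlenLoop seq (seq.drop (i - st.1)) := by omega
        have h1 : seq.getD j 0 = seq.getD (i - st.1 + j) 0 := by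
          have := mlen_getD_eq hj1
          rwa [pvGetD_drop] at this
        have hj2 : i - st.1 + j < pvMatchlenLoop (g.drop st.1) seq := by omega
        have h2 : g.getD (i + j) 0 = seq.getD (i - st.1 + j) 0 := by
          have := mlen_getD_eq hj2
          rw [pvGetD_drop] at this
          have he : st.1 + (i - st.1 + j) = i + j := by omega
          rwa [he] at this
        rw [pvGetD_drop]
        exact h2.trans h1.symm
    · rw [if_neg hir]; omega
  have hkeq : pvMExt seq g i (if i < st.2.1 then min (st.2.1 - i) (zs.getD (i - st.1) 0) else 0)
      = pvMatchlenLoop (g.drop i) seq := pvMExt_eq seq g i _ hk0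
  have hklen : pvMatchlenLoop (g.drop i) seq ≤ g.length - i := by
    have := pvMatchlenLoop_le (g.drop i) seq
    simp only [List.length_drop] at this
    omega
  have hm' : ∀ j, j < i + 1 →
      (st.2.2 ++ [pvMatchlenLoop (g.drop i) seq]).getD j 0 = pvMatchlenLoop (g.drop j) seq := by
    intro j hj
    rcases Nat.lt_or_ge j i with hji | hji
    · rw [List.getD_append _ _ _ _ (by omega)]
      exact hm j hji
    · have hje : j = i := by omega
      subst hje
      rw [List.getD_eq_getElem?_getD, List.getElem?_append_right (by omega), hlen]
      simp
  have hstep : pvMStep seq zs g st i =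
      if st.2.1 < i + pvMatchlenLoop (g.drop i) seq then
        (i, i + pvMatchlenLoop (g.drop i) seq, st.2.2 ++ [pvMatchlenLoop (g.drop i) seq])
      else (st.1, st.2.1, st.2.2 ++ [pvMatchlenLoop (g.drop i) seq]) := by
    simp only [pvMStep]
    rw [hkeq]
  rw [hstep]
  by_cases hup : st.2.1 < i + pvMatchlenLoop (g.drop i) seq
  · rw [if_pos hup]
    unfold pvMInv
    refine ⟨by simp [hlen], hm', ?_, ?_, ?_⟩
    · show i ≤ i + 1
      omega
    · show i + pvMatchlenLoop (g.drop i) seq ≤ g.length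
      omega
    · show i + pvMatchlenLoop (g.drop i) seq - i ≤ pvMatchlenLoop (g.drop i) seq
      omega
  · rw [if_neg hup]
    unfold pvMInv
    refine ⟨by simp [hlen], hm', ?_, hr, hw⟩
    show st.1 ≤ i + 1
    omega

theorem pvM_fold_inv (seq g : List Int) (zs : List Nat)
    (hzs0 : zs.getD 0 0 = seq.length)
    (hzsj : ∀ j, 1 ≤ j → j < seq.length → zs.getD j 0 = pvMatchlenLoop seq (seq.drop j)) :
    ∀ m, m ≤ g.length →
      pvMInv seq g m ((List.range' 0 m).foldl (pvMStep seq zs g) (0, 0, [])) := by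
  intro m
  induction m with
  | zero =>
      intro _
      simp only [List.range'_zero, List.foldl_nil]
      exact ⟨rfl, fun j hj => absurd hj (by omega), Nat.le_refl _, Nat.zero_le _, Nat.zero_le _⟩
  | succ m ih =>
      intro hm
      rw [List.range'_concat, List.foldl_append, List.foldl_cons, List.foldl_nil,
        Nat.one_mul, Nat.zero_add]
      exact pvMInv_step seq g zs hzs0 hzsj m _ (by omega) (ih (by omega))

theorem pvPrefMatch_getD (seq g : List Int) (hs : seq ≠ []) (p : Nat) (hp : p < g.length) :
    (pvPrefMatch seq (pvZSelf seq) g).getD p 0 = pvMatchlenLoop (g.drop p) seq := by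
  have hs0 : seq.length ≠ 0 := by cases seq <;> simp_all
  have hinv := pvM_fold_inv seq g (pvZSelf seq) (pvZSelf_getD0 seq hs0)
    (fun j h1 h2 => pvZSelf_getD seq j h1 h2) g.length (Nat.le_refl _)
  rw [pvPrefMatch]
  exact hinv.2.1 p hp

theorem pvMatchlen_ne_zero (seq g : List Int) (p : Nat) (hp : p < g.length) (hs : seq ≠ []) :
    (pvMatchlenLoop (g.drop p) seq ≠ 0) ↔ g.getD p 0 = seq.headD 0 := by
  rcases seq with _ | ⟨h, t⟩
  · exact absurd rfl hs
  · rw [List.drop_eq_getElem_cons hp, List.getD_eq_getElem g 0 hp]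
    simp only [pvMatchlenLoop, List.headD_cons]
    by_cases he : g[p] = h
    · simp [he]
    · simp [he]

-- B's inner fold over all positions equals the pvUpdA fold over the matching positions
theorem pvBInner_fold (i : Int) (m : List Nat) (l : List Nat)
    (mf : Nat → Nat) (hm : ∀ p ∈ l, m.getD p 0 = mf p) :
    ∀ acc, l.foldl (pvBInner i m) acc
      = ((l.filter (fun p => mf p ≠ 0)).map (fun p => (i, p, mf p))).foldl pvUpdA acc := by
  induction l with
  | nil => intro acc; rfl
  | cons p l ihl =>
      intro acc
      rw [List.foldl_cons, List.filter_cons]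
      have hmp := hm p (by simp)
      by_cases h0 : mf p ≠ 0
      · rw [if_pos (by simpa using h0), List.map_cons, List.foldl_cons]
        rw [ihl (fun q hq => hm q (by simp [hq]))]
        congr 1
        rcases acc with _ | x
        · simp only [pvBInner, hmp, pvUpdA]
          rw [if_pos h0, if_neg (by omega)]
        · simp only [pvBInner, hmp, pvUpdA]
          by_cases hle : x.2.2 ≤ mf p
          · rw [if_pos ⟨h0, hle⟩, if_neg (by omega)]
          · rw [if_neg (by tauto), if_pos (by omega)]
      · rw [if_neg (by simpa using h0)]
        rw [ihl (fun q hq => hm q (by simp [hq]))]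
        congr 1
        push_neg at h0
        rcases acc with _ | x
        · simp only [pvBInner]
          rw [hmp]
          simp [h0]
        · simp only [pvBInner]
          rw [hmp]
          simp [h0]

-- one group of B = one group of A
theorem pvBGroup_eq (g seq : List Int) (i : Int) (hs : seq ≠ []) (acc : Option (Int × Nat × Nat)) :
    (List.range' 1 (g.length - 1)).foldl (pvBInner i (pvPrefMatch seq (pvZSelf seq) g)) acc
      = pvALoop g seq i 0 acc := by
  rw [pvALoop_eq_foldl, pvPos_filter]
  rw [pvBInner_fold i _ _ (fun p => pvMatchlenLoop (g.drop p) seq) ?hm acc]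
  case hm =>
    intro p hp
    have := List.mem_range'.1 hp
    exact pvPrefMatch_getD seq g hs p (by omega)
  congr 1
  rw [List.filter_congr]
  intro p hp
  have hpr := List.mem_range'.1 hp
  have := pvMatchlen_ne_zero seq g p (by omega) hs
  simp only [decide_eq_decide]
  exact this

-- a pvUpdA fold result is the start value or one of the candidates
theorem pvFoldA_mem (cs : List (Int × Nat × Nat)) :
    ∀ acc, cs.foldl pvUpdA acc = acc ∨ ∃ c ∈ cs, cs.foldl pvUpdA acc = some c := by
  induction cs with
  | nil => intro acc; left; rfl
  | cons c cs ih =>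
      intro acc
      rw [List.foldl_cons]
      rcases ih (pvUpdA acc c) with h | ⟨d, hd, h⟩
      · rw [h]
        rcases acc with _ | x
        · right; exact ⟨c, by simp, by simp [pvUpdA]⟩
        · by_cases hc : c.2.2 < x.2.2
          · left
            unfold pvUpdA
            rw [if_pos hc]
          · right
            refine ⟨c, by simp, ?_⟩
            unfold pvUpdA
            rw [if_neg hc]
      · right; exact ⟨d, by simp [hd], h⟩

-- every candidate of pvALoop's fold has match length ≥ 1
theorem pvALoop_pos (g seq : List Int) (i : Int) (hs : seq ≠ [])
    (acc : Option (Int × Nat × Nat))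
    (hacc : acc = none ∨ ∃ t, acc = some t ∧ 1 ≤ t.2.2) :
    pvALoop g seq i 0 acc = none ∨ ∃ t, pvALoop g seq i 0 acc = some t ∧ 1 ≤ t.2.2 := by
  rw [pvALoop_eq_foldl]
  rcases pvFoldA_mem ((pvPos g (seq.headD 0) (0 + 1)).map
      (fun p => (i, p, pvMatchlenLoop (g.drop p) seq))) acc with h | ⟨c, hc, h⟩
  · rw [h]; exact hacc
  · right
    refine ⟨c, h, ?_⟩
    rcases List.mem_map.1 hc with ⟨p, hp, rfl⟩
    rw [pvPos_filter] at hp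
    rcases List.mem_filter.1 hp with ⟨hpr, hpe⟩
    have hprb := List.mem_range'.1 hpr
    have hplt : p < g.length := by omega
    have := (pvMatchlen_ne_zero seq g p hplt hs).2 (by simpa using hpe)
    simpa using Nat.one_le_iff_ne_zero.2 this

theorem pv_main (groups : List (List Int)) (seq : List Int) :
    seqingroups groups seq = seqingroups_alt groups seq := by
  unfold seqingroups seqingroups_alt
  by_cases h1 : groups = [] ∨ seq = []
  · rw [if_pos h1, if_pos h1]
  · rw [if_neg h1, if_neg h1]
    by_cases h2 : groups.any (fun g => g.length < 2)
    · rw [if_pos h2, if_pos h2]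
    · rw [if_neg h2, if_neg h2]
      have hseq : seq ≠ [] := by tauto
      show _ = (((PySem.List.enumerate groups).foldl (fun best ig =>
          if ig.2.headD 0 ≠ 0 then
            (List.range' 1 (ig.2.length - 1)).foldl
              (pvBInner ig.1 (pvPrefMatch seq (pvZSelf seq) ig.2)) best
          else best) none).map (fun c => [c.1, (c.2.1 : Int), (c.2.2 : Int)]))
      have hfold : (PySem.List.enumerate groups).foldl (fun best ig =>
            if ig.2.headD 0 ≠ 0 then
              (List.range' 1 (ig.2.length - 1)).foldl
                (pvBInner ig.1 (pvPrefMatch seq (pvZSelf seq) ig.2)) best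
            else best) none
          = (PySem.List.enumerate groups).foldl
            (fun best ig => if ig.2.headD 0 ≠ 0 then pvALoop ig.2 seq ig.1 0 best else best) none := by
        apply PySem.List.foldl_congr_mem
        intro acc ig _
        by_cases hh : ig.2.headD 0 ≠ 0
        · rw [if_pos hh, if_pos hh, pvBGroup_eq _ _ _ hseq]
        · rw [if_neg hh, if_neg hh]
      rw [hfold]
      have hpos : ∀ l : List (Int × List Int), ∀ acc,
          (acc = none ∨ ∃ t, acc = some t ∧ 1 ≤ t.2.2) →
          (l.foldl (fun best ig => if ig.2.headD 0 ≠ 0 then pvALoop ig.2 seq ig.1 0 best else best) acc = none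
            ∨ ∃ t, l.foldl (fun best ig => if ig.2.headD 0 ≠ 0 then pvALoop ig.2 seq ig.1 0 best else best) acc = some t ∧ 1 ≤ t.2.2) := by
        intro l
        induction l with
        | nil => intro acc h; exact h
        | cons ig l ihl =>
            intro acc h
            rw [List.foldl_cons]
            apply ihl
            by_cases hh : ig.2.headD 0 ≠ 0
            · rw [if_pos hh]; exact pvALoop_pos ig.2 seq ig.1 hseq acc h
            · rw [if_neg hh]; exact h
      rcases hpos (PySem.List.enumerate groups) none (Or.inl rfl) with h | ⟨t, ht, hpt⟩
      · rw [h]; rfl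
      · rw [ht]
        simp only [Option.map_some]
        rw [if_pos (by omega)]

-- ===== VERDICT (by name: the statement is the Claim_ definition above) =====
theorem seqingroups_spec : Claim_equal_seqingroups := by
  intro groups seq _ _
  unfold Spec_seqingroups
  exact pv_main groups seq
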